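-- pv_equiv track=rewrite | github.com/paprik05/Praca-Licencjacka | problems/prob38c.py | prob38c
-- ===== SOURCE A (Python) =====
-- def prob38c(n):
--     counter1 = 0
--     counter2 = 0
--     results = []
--     i = 1
--
--     while len(results) < n:
--         for d in range(1, i + 1):
--             if i % d == 0:
--                 if d % 4 == 1:
--                     counter1 += 1
--                 elif d % 4 == 3:
--                     counter2 += 1
--         if counter1 > counter2:
--             results.append(f"{i}: 4k+1 dividors count: {counter1}, 4k+3 dividors count: {counter2}")
--         counter1 = 0
--         counter2 = 0
--         i += 1
--
--     return {"result": results}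
-- ===== SOURCE B (Python) =====
-- def prob38c(n):
--     results = []
--     remaining = n
--     i = 0
--     while remaining > 0:
--         i += 1
--         # collect the divisors of i up to sqrt(i), then mirror each into its cofactor
--         lo = []
--         d = 1
--         while d * d <= i:
--             if i % d == 0:
--                 lo.append(d)
--             d += 1
--         divs = lo + [i // d for d in lo if i // d != d]
--         c1 = sum(1 for d in divs if d % 4 == 1)
--         c2 = sum(1 for d in divs if d % 4 == 3)
--         if c1 > c2:
--             results.append(f"{i}: 4k+1 dividors count: {c1}, 4k+3 dividors count: {c2}")
--             remaining -= 1
--     return {"result": results}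
-- ===== Notes on version B (the rewrite author's own statement) =====
-- stated objective: faster
-- what changed: B builds the full divisor list of each candidate i from the divisors up to sqrt(i) and their cofactors and counts the two residue classes over that list, and its outer loop counts down the number of results still needed instead of testing len(results); A scans every d in 1..i per candidate.
import Mathlib
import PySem

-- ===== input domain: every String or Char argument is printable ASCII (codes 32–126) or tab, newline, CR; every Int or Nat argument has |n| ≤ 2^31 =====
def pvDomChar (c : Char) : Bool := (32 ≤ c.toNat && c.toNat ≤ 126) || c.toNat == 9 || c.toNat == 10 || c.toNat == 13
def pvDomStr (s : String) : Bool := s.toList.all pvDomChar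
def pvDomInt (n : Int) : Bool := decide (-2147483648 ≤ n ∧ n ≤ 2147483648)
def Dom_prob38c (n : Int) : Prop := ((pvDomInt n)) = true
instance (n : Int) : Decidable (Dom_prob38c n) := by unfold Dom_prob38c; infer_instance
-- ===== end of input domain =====

-- B replaces A's per-candidate scan of every d in 1..i by building the divisor list of i from
-- the divisors up to √i and their cofactors, counting the 4k+1/4k+3 residues over that list,
-- and counting down the number of results still needed (asymptotically less work per candidate).
-- Both ports keep the loop variable i and all divisor arithmetic over Nat: every Python value
-- involved is nonnegative, where Python's %, //, range agree exactly with Nat's %, /, List.range'.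
-- Each `while` is transcribed with a fuel guard (one tick = one Python iteration) that only makes
-- the recursion structural; both ports start from the same fuel literal.

-- ===== PORT A =====
-- the classification of one d inside A's inner loop (branches in A's order)
def pvStepA (i : Nat) (c : Int × Int) (d : Nat) : Int × Int :=
  if i % d = 0 then
    if d % 4 = 1 then (c.1 + 1, c.2)
    else if d % 4 = 3 then (c.1, c.2 + 1)
    else c
  else c

-- A's inner `for d in range(1, i + 1)` pass: (counter1, counter2) for candidate i
def pvCountA (i : Nat) : Int × Int := (List.range' 1 i).foldl (pvStepA i) (0, 0)

-- the f-string (identical text in A and B)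
def pvFmt (i : Nat) (c1 c2 : Int) : String :=
  PySem.Int.toStr (Int.ofNat i) ++ ": 4k+1 dividors count: " ++ PySem.Int.toStr c1
    ++ ", 4k+3 dividors count: " ++ PySem.Int.toStr c2

-- A's `while len(results) < n` loop (fuel-guarded tick-by-tick transcription)
def pvLoopA (fuel : Nat) (n : Int) (res : List String) (i : Nat) : List String :=
  match fuel with
  | 0 => res
  | fuel + 1 =>
    if (res.length : Int) < n then
      let c := pvCountA i
      pvLoopA fuel n (if c.1 > c.2 then res ++ [pvFmt i c.1 c.2] else res) (i + 1)
    else res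

def prob38c (n : Int) : List (String × List String) := [("result", pvLoopA 17179869184 n [] 1)]

-- ===== PORT B =====
-- B's `while d * d <= i` collecting loop: exactly the divisors d = 1..⌊√i⌋ (d * d ≤ i ↔ d ≤ Nat.sqrt i)
def pvLow (i : Nat) : List Nat := (List.range' 1 (Nat.sqrt i)).filter (fun d => i % d == 0)

-- `divs = lo + [i // d for d in lo if i // d != d]`
def pvDivs (i : Nat) : List Nat :=
  pvLow i ++ ((pvLow i).filter (fun d => !(i / d == d))).map (fun d => i / d)

-- `c1 = sum(1 for d in divs if d % 4 == 1)`, `c2 = sum(1 for d in divs if d % 4 == 3)`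
def pvC1 (i : Nat) : Int := (((pvDivs i).filter (fun d => d % 4 == 1)).length : Int)
def pvC2 (i : Nat) : Int := (((pvDivs i).filter (fun d => d % 4 == 3)).length : Int)

-- B's `while remaining > 0` loop: advance to candidate i + 1, count down on each hit
-- (fuel-guarded tick-by-tick transcription, same fuel literal as A's loop)
def pvLoopB (fuel : Nat) (remaining : Int) (res : List String) (i : Nat) : List String :=
  match fuel with
  | 0 => res
  | fuel + 1 =>
    if 0 < remaining then
      if pvC1 (i + 1) > pvC2 (i + 1) then
        pvLoopB fuel (remaining - 1) (res ++ [pvFmt (i + 1) (pvC1 (i + 1)) (pvC2 (i + 1))]) (i + 1)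
      else
        pvLoopB fuel remaining res (i + 1)
    else res

def prob38c_alt (n : Int) : List (String × List String) := [("result", pvLoopB 17179869184 n [] 0)]

-- ===== PRECONDITION & SPEC =====
def Spec_prob38c (n : Int) (out : List (String × List String)) : Prop := out = prob38c_alt n
instance (n : Int) (out : List (String × List String)) : Decidable (Spec_prob38c n out) := by unfold Spec_prob38c; infer_instance

-- ===== CLAIM (what is proved, stated in full; the proofs are below) =====
def Claim_equal_prob38c : Prop := ∀ (n : Int), Dom_prob38c n → Spec_prob38c n (prob38c n)

-- ===== LEMMAS AND PROOFS =====
-- indicator functions for the two residue classes, and A's per-divisor contributions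
def pvF1 (d : Nat) : Int := if d % 4 = 1 then 1 else 0
def pvF3 (d : Nat) : Int := if d % 4 = 3 then 1 else 0
def pvT1 (i d : Nat) : Int := if i % d = 0 ∧ d % 4 = 1 then 1 else 0
def pvT3 (i d : Nat) : Int := if i % d = 0 ∧ d % 4 = 3 then 1 else 0

theorem pvCountA_fold (i : Nat) (l : List Nat) (a b : Int) :
    l.foldl (pvStepA i) (a, b) = (a + (l.map (pvT1 i)).sum, b + (l.map (pvT3 i)).sum) := by
  induction l generalizing a b with
  | nil => simp
  | cons d l ih =>
    simp only [List.foldl_cons, List.map_cons, List.sum_cons, pvStepA, pvT1, pvT3]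
    split_ifs <;> rw [ih] <;> simp [Prod.ext_iff] <;> omega

theorem pvSum_range'_eq (a n : Nat) (f : Nat → Int) :
    ((List.range' a n).map f).sum = ∑ d ∈ Finset.Ico a (a + n), f d := by
  induction n with
  | zero => simp
  | succ n ih =>
    rw [List.range'_1_concat, List.map_append, List.sum_append,
      show a + (n + 1) = (a + n) + 1 from rfl,
      Finset.sum_Ico_succ_top (Nat.le_add_right a n), ih]
    simp

theorem pvT1_eq (i d : Nat) : pvT1 i d = if i % d = 0 then pvF1 d else 0 := by
  unfold pvT1 pvF1
  split_ifs <;> simp_all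

theorem pvT3_eq (i d : Nat) : pvT3 i d = if i % d = 0 then pvF3 d else 0 := by
  unfold pvT3 pvF3
  split_ifs <;> simp_all

theorem pvLenFilterSum (p : Nat → Bool) (l : List Nat) :
    (((l.filter p).length : Nat) : Int) = (l.map (fun d => if p d then (1 : Int) else 0)).sum := by
  induction l with
  | nil => simp
  | cons d l ih =>
    by_cases h : p d <;> simp [h, ih] <;> omega

theorem pvMapFilterSum (p : Nat → Bool) (f : Nat → Int) (l : List Nat) :
    ((l.filter p).map f).sum = (l.map (fun d => if p d then f d else 0)).sum := by
  induction l with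
  | nil => simp
  | cons d l ih => by_cases h : p d <;> simp [h, ih]

theorem pvSumMapAdd (f g : Nat → Int) (l : List Nat) :
    (l.map (fun d => f d + g d)).sum = (l.map f).sum + (l.map g).sum := by
  induction l with
  | nil => simp
  | cons d l ih => simp [ih]; ring


-- a divisor larger than √i pairs with one at most √i
theorem pvSmall_of_large {i d : Nat} (hd : d ∣ i) (hl : Nat.sqrt i < d) :
    i / d ≤ Nat.sqrt i := by
  by_contra hq
  push Not at hq
  have h1 : i / d * d = i := Nat.div_mul_cancel hd
  have h2 : i < (Nat.sqrt i + 1) * (Nat.sqrt i + 1) := Nat.lt_succ_sqrt i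
  have h3 : (Nat.sqrt i + 1) * (Nat.sqrt i + 1) ≤ i / d * d := Nat.mul_le_mul hq hl
  omega

-- the cofactor of a divisor ≤ √i other than its own cofactor is > √i
theorem pvLarge_of_small {i d : Nat} (hi : 0 < i) (hd : d ∣ i) (hs : d ≤ Nat.sqrt i)
    (hne : i / d ≠ d) : Nat.sqrt i < i / d := by
  by_contra hq
  push Not at hq
  have hd0 : 0 < d := Nat.pos_of_dvd_of_pos hd hi
  have h1 : i / d * d = i := Nat.div_mul_cancel hd
  have h2 : Nat.sqrt i * Nat.sqrt i ≤ i := Nat.sqrt_le i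
  rcases Nat.lt_or_ge (i / d) d with hlt | hge
  · have h3 : i / d * d < d * d := (Nat.mul_lt_mul_right hd0).mpr hlt
    have h4 : d * d ≤ Nat.sqrt i * Nat.sqrt i := Nat.mul_le_mul hs hs
    omega
  · have hdq : d < i / d := lt_of_le_of_ne hge (Ne.symm hne)
    have hq0 : 0 < i / d := by omega
    have h3 : i / d * d < i / d * (i / d) := (Nat.mul_lt_mul_left hq0).mpr hdq
    have h4 : i / d * (i / d) ≤ Nat.sqrt i * Nat.sqrt i := Nat.mul_le_mul hq hq
    omega

-- the divisor-pairing reflection: a sum over all divisors equals the paired sum over d ≤ √i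
theorem pvReflect (i : Nat) (hi : 0 < i) (f : Nat → Int) :
    (∑ d ∈ Finset.Ico 1 (1 + i), if i % d = 0 then f d else 0)
    = ∑ d ∈ Finset.Ico 1 (1 + Nat.sqrt i),
        if i % d = 0 then f d + (if i / d ≠ d then f (i / d) else 0) else 0 := by
  have hsle : Nat.sqrt i ≤ i := Nat.sqrt_le_self i
  rw [← Finset.sum_filter, ← Finset.sum_filter]
  have hDs : (Finset.Ico 1 (1 + Nat.sqrt i)).filter (fun d => i % d = 0)
      = ((Finset.Ico 1 (1 + i)).filter (fun d => i % d = 0)).filter (fun d => d ≤ Nat.sqrt i) := by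
    rw [Finset.filter_filter]
    ext d
    simp only [Finset.mem_filter, Finset.mem_Ico]
    constructor
    · rintro ⟨⟨h1, h2⟩, h3⟩
      exact ⟨⟨h1, by omega⟩, h3, by omega⟩
    · rintro ⟨⟨h1, h2⟩, h3, h4⟩
      exact ⟨⟨h1, by omega⟩, h3⟩
  rw [hDs, Finset.sum_add_distrib, ← Finset.sum_filter,
    ← Finset.sum_filter_add_sum_filter_not ((Finset.Ico 1 (1 + i)).filter (fun d => i % d = 0))
      (fun d => d ≤ Nat.sqrt i) f]
  congr 1
  apply Finset.sum_nbij' (fun d => i / d) (fun d => i / d)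
  · intro d hd
    simp only [Finset.mem_filter, Finset.mem_Ico, not_le] at hd ⊢
    obtain ⟨⟨⟨h1, h2⟩, hmod⟩, hgt⟩ := hd
    have hdvd : d ∣ i := Nat.dvd_of_mod_eq_zero hmod
    have hqdvd : i / d ∣ i := Nat.div_dvd_of_dvd hdvd
    have hq1 : 0 < i / d := Nat.div_pos (Nat.le_of_dvd hi hdvd) (by omega)
    have hqs : i / d ≤ Nat.sqrt i := pvSmall_of_large hdvd hgt
    have hdd : i / (i / d) = d := Nat.div_div_self hdvd (by omega)
    exact ⟨⟨⟨⟨hq1, by omega⟩, (Nat.dvd_iff_mod_eq_zero).mp hqdvd⟩, hqs⟩, by omega⟩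
  · intro d hd
    simp only [Finset.mem_filter, Finset.mem_Ico, not_le] at hd ⊢
    obtain ⟨⟨⟨⟨h1, h2⟩, hmod⟩, hle⟩, hne⟩ := hd
    have hdvd : d ∣ i := Nat.dvd_of_mod_eq_zero hmod
    have hqdvd : i / d ∣ i := Nat.div_dvd_of_dvd hdvd
    have hq1 : 0 < i / d := Nat.div_pos (Nat.le_of_dvd hi hdvd) (by omega)
    have hqi : i / d ≤ i := Nat.div_le_self i d
    have hqs : Nat.sqrt i < i / d := pvLarge_of_small hi hdvd hle hne
    exact ⟨⟨⟨hq1, by omega⟩, (Nat.dvd_iff_mod_eq_zero).mp hqdvd⟩, hqs⟩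
  · intro d hd
    simp only [Finset.mem_filter, Finset.mem_Ico] at hd
    exact Nat.div_div_self (Nat.dvd_of_mod_eq_zero hd.1.2) (by omega)
  · intro d hd
    simp only [Finset.mem_filter, Finset.mem_Ico] at hd
    exact Nat.div_div_self (Nat.dvd_of_mod_eq_zero hd.1.1.2) (by omega)
  · intro d hd
    simp only [Finset.mem_filter, Finset.mem_Ico] at hd
    rw [Nat.div_div_self (Nat.dvd_of_mod_eq_zero hd.1.2) (by omega)]

-- B's divisor-list count rewritten as the paired sum over d = 1..√i
theorem pvCB_sum (i : Nat) (p : Nat → Bool) (f : Nat → Int)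
    (hpf : ∀ d, (if p d then (1 : Int) else 0) = f d) :
    ((((pvLow i ++ ((pvLow i).filter (fun d => !(i / d == d))).map (fun d => i / d)).filter
        p).length : Nat) : Int)
    = ((List.range' 1 (Nat.sqrt i)).map
        (fun d => if i % d = 0 then f d + (if i / d ≠ d then f (i / d) else 0) else 0)).sum := by
  rw [List.filter_append, List.length_append]
  push_cast
  rw [pvLenFilterSum, pvLenFilterSum]
  have hmap : (((pvLow i).filter (fun d => !(i / d == d))).map (fun d => i / d)).map
      (fun d => if p d then (1 : Int) else 0)
      = ((pvLow i).filter (fun d => !(i / d == d))).map (fun d => if p (i / d) then (1 : Int) else 0) := by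
    rw [List.map_map]; rfl
  rw [hmap, pvMapFilterSum]
  unfold pvLow
  rw [pvMapFilterSum, pvMapFilterSum, ← pvSumMapAdd]
  apply congrArg
  apply List.map_congr_left
  intro d _
  by_cases hm : i % d = 0 <;> by_cases hne : i / d = d <;>
    simp [hm, hne, hpf]

-- B's counts equal A's counters for every candidate i
theorem pvC1_eq (i : Nat) : pvC1 i = (pvCountA i).1 := by
  rcases Nat.eq_zero_or_pos i with rfl | hi
  · rfl
  · unfold pvC1 pvDivs pvCountA
    rw [pvCountA_fold,
      pvCB_sum i _ pvF1 (fun d => by unfold pvF1; by_cases h : d % 4 = 1 <;> simp [h])]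
    simp only [zero_add]
    rw [pvSum_range'_eq, pvSum_range'_eq]
    have := pvReflect i hi pvF1
    simp only [pvT1_eq]
    exact this.symm

theorem pvC2_eq (i : Nat) : pvC2 i = (pvCountA i).2 := by
  rcases Nat.eq_zero_or_pos i with rfl | hi
  · rfl
  · unfold pvC2 pvDivs pvCountA
    rw [pvCountA_fold,
      pvCB_sum i _ pvF3 (fun d => by unfold pvF3; by_cases h : d % 4 = 3 <;> simp [h])]
    simp only [zero_add]
    rw [pvSum_range'_eq, pvSum_range'_eq]
    have := pvReflect i hi pvF3
    simp only [pvT3_eq]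
    exact this.symm


theorem pvLoopBA (fuel : Nat) (rem : Int) (res : List String) (i : Nat) :
    pvLoopB fuel rem res i = pvLoopA fuel (rem + res.length) res (i + 1) := by
  induction fuel generalizing rem res i with
  | zero => rfl
  | succ fuel ih =>
    show (if 0 < rem then _ else res) = (if (res.length : Int) < rem + res.length then _ else res)
    by_cases h : 0 < rem
    · rw [if_pos h, if_pos (show (res.length : Int) < rem + res.length by omega)]
      show (if pvC1 (i + 1) > pvC2 (i + 1) then _ else _)
          = pvLoopA fuel (rem + res.length)
              (if (pvCountA (i + 1)).1 > (pvCountA (i + 1)).2 then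
                res ++ [pvFmt (i + 1) (pvCountA (i + 1)).1 (pvCountA (i + 1)).2]
              else res) (i + 1 + 1)
    -- both loops examine the same candidate i + 1; B's counts equal A's by pvC1_eq / pvC2_eq
      by_cases hq : pvC1 (i + 1) > pvC2 (i + 1)
      · have hq' : (pvCountA (i + 1)).1 > (pvCountA (i + 1)).2 := by
          rw [← pvC1_eq, ← pvC2_eq]; exact hq
        rw [if_pos hq, if_pos hq', ih, pvC1_eq, pvC2_eq]
        congr 1
        simp only [List.length_append, List.length_cons, List.length_nil]
        push_cast
        ring
      · have hq' : ¬ (pvCountA (i + 1)).1 > (pvCountA (i + 1)).2 := by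
          rw [← pvC1_eq, ← pvC2_eq]; exact hq
        rw [if_neg hq, if_neg hq', ih]
    · rw [if_neg h, if_neg (show ¬ (res.length : Int) < rem + res.length by omega)]

-- ===== VERDICT (by name: the statement is the Claim_ definition above) =====
theorem prob38c_spec : Claim_equal_prob38c := by
  intro n _
  unfold Spec_prob38c prob38c prob38c_alt
  rw [pvLoopBA]
  simp
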